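-- pv_equiv track=rewrite | github.com/alphaninja27/Hackerrank-solutions | Problem Solving/Hackerland Radio Transmitters.py | hackerlandRadioTransmitters
-- ===== SOURCE A (Python) =====
-- def hackerlandRadioTransmitters(x, k):
--     # Write your code here
--     x.sort()
--     res = 0
--     maxdist = 0
--     dist = k
--     for i in range(len(x) - 1):
--         if x[i] <= maxdist:
--             continue
--         else:
--             if x[i + 1] <= x[i] + dist:
--                 dist = x[i] + dist - x[i + 1]
--             else:
--                 res += 1
--                 dist = k
--                 maxdist = x[i] + k
--     if x[-1] > maxdist:
--         res += 1
--     return res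
-- ===== SOURCE B (Python) =====
-- def hackerlandRadioTransmitters(x, k):
--     # Pointer-jumping greedy on the sorted list (sorts x in place, like A):
--     # for each uncovered house, scan to the farthest house within k and place
--     # one transmitter there; returns 0 on an empty list (A raises IndexError).
--     x.sort()
--     n = len(x)
--     res = 0
--     covered = 0
--     i = 0
--     while i < n:
--         if x[i] <= covered:
--             i += 1
--             continue
--         j = i
--         while j + 1 < n and x[j + 1] <= x[i] + k:
--             j += 1
--         res += 1
--         covered = x[j] + k
--         i = j + 1
--     return res
-- ===== Notes on version B (the rewrite author's own statement) =====
-- stated objective: alternative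
-- what changed: Replaces A's single-pass slack accumulator (carrying res/maxdist/dist per index) by the textbook pointer-jumping greedy: for each uncovered house an inner scan finds the farthest house within k, places one transmitter there and jumps the pointer past it; B returns 0 on the empty list where A raises IndexError (both sort x in place).
import Mathlib
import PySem

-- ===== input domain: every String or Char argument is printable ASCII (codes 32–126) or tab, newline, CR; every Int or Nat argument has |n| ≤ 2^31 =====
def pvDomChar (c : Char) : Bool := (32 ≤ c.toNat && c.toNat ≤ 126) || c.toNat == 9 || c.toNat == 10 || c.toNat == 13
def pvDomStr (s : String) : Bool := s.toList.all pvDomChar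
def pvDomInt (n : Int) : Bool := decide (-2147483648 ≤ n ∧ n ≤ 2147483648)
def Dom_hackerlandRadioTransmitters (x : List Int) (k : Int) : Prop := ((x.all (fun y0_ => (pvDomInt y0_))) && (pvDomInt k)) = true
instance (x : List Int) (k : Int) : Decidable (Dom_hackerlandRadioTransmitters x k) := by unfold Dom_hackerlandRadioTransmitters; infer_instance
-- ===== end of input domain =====

-- B replaces A's slack-accumulator pass by the textbook pointer-jumping greedy; equivalence of the
-- RETURN value is proved (both Pythons sort x in place, an identical side effect).

-- ===== PORT A =====
-- A's for-loop over i in range(len(x)-1) reads x[i] and x[i+1]; ported as the obvious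
-- recursion over the sorted list carrying the same state (res, maxdist, dist).
def pvALoop (k : Int) : List Int → Int → Int → Int → Int × Int
  | a :: b :: rest, res, maxdist, dist =>
      if a ≤ maxdist then pvALoop k (b :: rest) res maxdist dist
      else if b ≤ a + dist then pvALoop k (b :: rest) res maxdist (a + dist - b)
      else pvALoop k (b :: rest) (res + 1) (a + k) k
  | _, res, maxdist, _ => (res, maxdist)

def pvAFinish (k : Int) (s : List Int) : Int :=
  let p := pvALoop k s 0 0 k
  match PySem.List.pyGet? s (-1) with          -- x[-1]; none = IndexError, excluded by Pre_
  | some last => if p.2 < last then p.1 + 1 else p.1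
  | none => 0

def hackerlandRadioTransmitters (x : List Int) (k : Int) : Int :=
  pvAFinish k (PySem.List.sorted x (fun v => v) false)

-- ===== PORT B =====
-- inner while loop: advance j while the next house is within x[i]+k; returns (x[j], suffix after j)
def pvBInner (lim : Int) : Int → List Int → Int × List Int
  | cur, [] => (cur, [])
  | cur, b :: rest => if b ≤ lim then pvBInner lim b rest else (cur, b :: rest)

theorem pvBInner_len (lim cur : Int) (l : List Int) :
    (pvBInner lim cur l).2.length ≤ l.length := by
  induction l generalizing cur with
  | nil => simp [pvBInner]
  | cons b rest ih =>
      by_cases h : b ≤ lim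
      · simpa [pvBInner, h] using le_trans (ih b) (by omega)
      · simp [pvBInner, h]

-- outer while loop over the pointer i, ported as recursion on the remaining suffix
def pvBLoop (k : Int) : List Int → Int → Int → Int
  | [], res, _ => res
  | a :: rest, res, covered =>
      if a ≤ covered then pvBLoop k rest res covered
      else pvBLoop k (pvBInner (a + k) a rest).2 (res + 1) ((pvBInner (a + k) a rest).1 + k)
termination_by l => l.length
decreasing_by
  · simp
  · have := pvBInner_len (a + k) a rest
    simp; omega

def hackerlandRadioTransmitters_alt (x : List Int) (k : Int) : Int :=
  pvBLoop k (PySem.List.sorted x (fun v => v) false) 0 0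

-- ===== PRECONDITION & SPEC =====
-- Pre_ excludes only the empty list, on which Python A raises IndexError at x[-1].
def Pre_hackerlandRadioTransmitters (x : List Int) (k : Int) : Prop := x ≠ []
instance (x : List Int) (k : Int) : Decidable (Pre_hackerlandRadioTransmitters x k) := by
  unfold Pre_hackerlandRadioTransmitters; infer_instance

def pvWitness_hackerlandRadioTransmitters : List Int × Int := ([1, 2, 3, 5, 9], 1)

def Spec_hackerlandRadioTransmitters (x : List Int) (k : Int) (out : Int) : Prop := out = hackerlandRadioTransmitters_alt x k
instance (x : List Int) (k : Int) (out : Int) : Decidable (Spec_hackerlandRadioTransmitters x k out) := by unfold Spec_hackerlandRadioTransmitters; infer_instance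

-- ===== CLAIM (what is proved, stated in full; the proofs are below) =====
def Claim_equal_hackerlandRadioTransmitters : Prop := ∀ (x : List Int) (k : Int), Dom_hackerlandRadioTransmitters x k → Pre_hackerlandRadioTransmitters x k → Spec_hackerlandRadioTransmitters x k (hackerlandRadioTransmitters x k)

-- ===== LEMMAS AND PROOFS =====

-- A's tail step: loop result followed by the final 'if x[-1] > maxdist' check
def pvFinish (l : List Int) (p : Int × Int) : Int :=
  match l.getLast? with
  | some t => if p.2 < t then p.1 + 1 else p.1
  | none => p.1

theorem pvFinish_cons (a b : Int) (rest : List Int) (p : Int × Int) :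
    pvFinish (a :: b :: rest) p = pvFinish (b :: rest) p := by
  simp [pvFinish, List.getLast?_cons_cons]

-- the chain lemma: from a chain started at a, with current element cur (md < cur ≤ a+k) and
-- slack dist = a+k-cur, A processes the rest of the chain exactly as B's inner scan does
theorem pvChain (k a : Int) (N : Nat)
    (MIH : ∀ (l : List Int), l.length ≤ N → l.Pairwise (· ≤ ·) →
      ∀ res md, pvFinish l (pvALoop k l res md k) = pvBLoop k l res md) :
    ∀ (rest : List Int) (cur res md : Int), (cur :: rest).length ≤ N →
      (cur :: rest).Pairwise (· ≤ ·) → md < cur → cur ≤ a + k →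
      pvFinish (cur :: rest) (pvALoop k (cur :: rest) res md (a + k - cur)) =
        pvBLoop k (pvBInner (a + k) cur rest).2 (res + 1) ((pvBInner (a + k) cur rest).1 + k) := by
  intro rest
  induction rest with
  | nil =>
      intro cur res md _ _ hmd _
      simp [pvALoop, pvFinish, pvBInner, pvBLoop, hmd]
  | cons b rest2 ih =>
      intro cur res md hlen hs hmd hcur
      have hcb : cur ≤ b := (List.pairwise_cons.mp hs).1 b (by simp)
      by_cases hb : b ≤ a + k
      · have h1 : pvALoop k (cur :: b :: rest2) res md (a + k - cur) =
            pvALoop k (b :: rest2) res md (a + k - b) := by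
          have : ¬ cur ≤ md := by omega
          have hb' : b ≤ cur + (a + k - cur) := by omega
          simp only [pvALoop, if_neg this, if_pos hb']
          ring_nf
        rw [h1, pvFinish_cons,
          ih b res md (by simp at hlen ⊢; omega) hs.of_cons (by omega) hb]
        simp [pvBInner, hb]
      · have h1 : pvALoop k (cur :: b :: rest2) res md (a + k - cur) =
            pvALoop k (b :: rest2) (res + 1) (cur + k) k := by
          have : ¬ cur ≤ md := by omega
          have hb' : ¬ b ≤ cur + (a + k - cur) := by omega
          simp only [pvALoop]
          rw [if_neg this, if_neg hb']
        rw [h1, pvFinish_cons,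
          MIH (b :: rest2) (by simp at hlen ⊢; omega) hs.of_cons (res + 1) (cur + k)]
        simp [pvBInner, hb]

theorem pvMain (k : Int) (n : Nat) : ∀ (l : List Int), l.length ≤ n → l.Pairwise (· ≤ ·) →
    ∀ res md, pvFinish l (pvALoop k l res md k) = pvBLoop k l res md := by
  induction n with
  | zero =>
      intro l hl _ res md
      have : l = [] := List.eq_nil_of_length_eq_zero (by omega)
      subst this; simp [pvALoop, pvFinish, pvBLoop]
  | succ n ih =>
      intro l hl hs res md
      match l with
      | [] => simp [pvALoop, pvFinish, pvBLoop]
      | [a] =>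
          by_cases h : a ≤ md
          · simp [pvALoop, pvFinish, pvBLoop, h, show ¬ md < a by omega]
          · simp [pvALoop, pvFinish, pvBLoop, pvBInner, h, show md < a by omega]
      | a :: b :: rest =>
          by_cases h : a ≤ md
          · have h1 : pvALoop k (a :: b :: rest) res md k = pvALoop k (b :: rest) res md k := by
              simp [pvALoop, h]
            rw [h1, pvFinish_cons, ih (b :: rest) (by simp at hl ⊢; omega)
              hs.of_cons res md]
            conv_rhs => rw [pvBLoop]
            simp [h]
          · have hab : a ≤ b := (List.pairwise_cons.mp hs).1 b (by simp)
            have hrhs : pvBLoop k (a :: b :: rest) res md =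
                pvBLoop k (pvBInner (a + k) a (b :: rest)).2 (res + 1)
                  ((pvBInner (a + k) a (b :: rest)).1 + k) := by
              conv_lhs => rw [pvBLoop]
              simp [h]
            by_cases hb : b ≤ a + k
            · have h1 : pvALoop k (a :: b :: rest) res md k =
                  pvALoop k (b :: rest) res md (a + k - b) := by
                simp [pvALoop, h, hb]
              rw [h1, hrhs, pvFinish_cons]
              have := pvChain k a n (ih) rest b res md (by simp at hl ⊢; omega)
                hs.of_cons (by omega) hb
              rw [this]
              simp [pvBInner, hb]
            · have h1 : pvALoop k (a :: b :: rest) res md k =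
                  pvALoop k (b :: rest) (res + 1) (a + k) k := by
                simp [pvALoop, h, hb]
              rw [h1, hrhs, pvFinish_cons,
                ih (b :: rest) (by simp at hl ⊢; omega) hs.of_cons (res + 1) (a + k)]
              simp [pvBInner, hb]

-- ===== VERDICT (by name: the statement is the Claim_ definition above) =====
theorem pvAFinish_eq (k : Int) (s : List Int) (h : s ≠ []) :
    pvAFinish k s = pvFinish s (pvALoop k s 0 0 k) := by
  have hget : PySem.List.pyGet? s (-1) = some (s.getLast h) := by
    rw [PySem.List.pyGet?_neg_one, List.getLast?_eq_some_getLast]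
  simp only [pvAFinish, hget, pvFinish, List.getLast?_eq_some_getLast (h := h)]

theorem hackerlandRadioTransmitters_spec : Claim_equal_hackerlandRadioTransmitters := by
  intro x k _ hpre
  unfold Spec_hackerlandRadioTransmitters hackerlandRadioTransmitters hackerlandRadioTransmitters_alt
  have hsne : PySem.List.sorted x (fun v => v) false ≠ [] := by
    intro h
    apply hpre
    have hp := (PySem.List.sorted_perm (xs := x) (key := fun v => v) (rev := false)).length_eq
    rw [h] at hp
    exact List.eq_nil_of_length_eq_zero hp.symm
  have hs : (PySem.List.sorted x (fun v => v) false).Pairwise (· ≤ ·) := by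
    simpa using PySem.List.sorted_pairwise (xs := x) (key := fun v => v)
  rw [pvAFinish_eq k _ hsne]
  exact pvMain k _ _ (le_refl _) hs 0 0
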